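-- pv_equiv track=rewrite | github.com/micaleel/clog | clog/page.py | format_codeblock
-- ===== SOURCE A (Python) =====
-- CODE_BACKTICKS = "```"
--
-- def format_codeblock(text: str) -> str:
--     """Formats a markdown code block a HighlightJS friendly manner"""
--
--     def _get_backticks_prefix(text):
--         """Get the text before the backticks in a line"""
--         backticks_pos = text.find(CODE_BACKTICKS)
--         return "" if backticks_pos == -1 else text[:backticks_pos]
--
--     lines = text.split("\n")
--     codeblocks = []
--     languages = {}
--
--     # Find all codeblocks
--     for idx, line in enumerate(lines):
--         if line.strip().startswith(CODE_BACKTICKS):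
--             codeblocks.append(idx)
--             lang = line.replace(CODE_BACKTICKS, "").strip()
--             if len(lang) > 0:
--                 languages[idx] = lang
--
--     if len(codeblocks) % 2 != 0:
--         raise ValueError("Inconsistent code block")
--
--     for i in range(0, len(codeblocks), 2):
--         start, end = codeblocks[i], codeblocks[i + 1]
--         bt_prefix = _get_backticks_prefix(lines[start])
--         lang = languages.get(start, "")
--         if lang:
--             lines[start] = (
--                 bt_prefix + f'<pre class="highlight"><code class="language-{lang}">'
--             )
--         else:
--             lines[start] = bt_prefix + "<pre><code>"
--
--         lines[end] = lines[end].replace(CODE_BACKTICKS, f"</code></pre>")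
--         codeblocks.pop(0)
--         codeblocks.pop(0)
--
--     return "\n".join(lines)
-- ===== SOURCE B (Python) =====
-- CODE_BACKTICKS = "```"
--
-- def format_codeblock(text: str) -> str:
--     """Formats a markdown code block a HighlightJS friendly manner"""
--     out = []
--     in_block = False
--     for line in text.split("\n"):
--         if line.strip().startswith(CODE_BACKTICKS):
--             if not in_block:
--                 prefix = line[: line.find(CODE_BACKTICKS)]
--                 lang = line.replace(CODE_BACKTICKS, "").strip()
--                 if lang:
--                     out.append(
--                         prefix
--                         + f'<pre class="highlight"><code class="language-{lang}">'
--                     )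
--                 else:
--                     out.append(prefix + "<pre><code>")
--             else:
--                 out.append(line.replace(CODE_BACKTICKS, "</code></pre>"))
--             in_block = not in_block
--         else:
--             out.append(line)
--     if in_block:
--         raise ValueError("Inconsistent code block")
--     return "\n".join(out)
-- ===== Notes on version B (the rewrite author's own statement) =====
-- stated objective: simpler
-- what changed: B replaces A's three-phase design (collect all fence-line indices into a list plus a languages dict, then a range(0,len,2) loop that mutates lines in place while popping the index list) with a single left-to-right pass over the lines carrying only an in_block flag, emitting each transformed line as it goes.
-- crash fix: On any text whose number of fence lines is an even number >= 4 (two or more code blocks), A raises IndexError (its range loop indexes the codeblocks list with stale indices while popping it), while B returns the text with every code block converted. — e.g. on format_codeblock("```\na\n```\n```py\nb\n```"): A raises IndexError, B returns "<pre><code>\na\n</code></pre>\n<pre class=\"highlight\"><code class=\"language-py\">\nb\n</code></pre>"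
import Mathlib
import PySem

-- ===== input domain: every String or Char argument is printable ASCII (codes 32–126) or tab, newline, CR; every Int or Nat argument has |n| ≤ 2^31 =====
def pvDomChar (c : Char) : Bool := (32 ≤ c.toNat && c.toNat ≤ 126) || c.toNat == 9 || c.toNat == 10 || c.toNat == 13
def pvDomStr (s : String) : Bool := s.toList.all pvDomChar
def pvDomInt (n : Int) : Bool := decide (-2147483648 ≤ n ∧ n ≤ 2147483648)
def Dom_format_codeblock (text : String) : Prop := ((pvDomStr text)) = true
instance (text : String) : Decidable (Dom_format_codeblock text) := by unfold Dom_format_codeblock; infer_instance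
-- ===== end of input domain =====

-- B replaces A's marker-index collection, languages dict and index-popping pair loop by one
-- left-to-right pass over the lines with an in_block flag (objective: simpler); inside Pre_ the
-- return values are proved equal; where A raises (see Pre_/Raises_) B's ValueError/return differ as stated.

-- ===== PORT A =====
-- _get_backticks_prefix
def pvGetBackticksPrefix (text : String) : String :=
  let backticksPos := PySem.Str.find text "```"
  if backticksPos = -1 then "" else PySem.Str.slice text none (some backticksPos)

-- lines[i] = v for the nonnegative in-range indices these ports reach (enumerate indices); exact there
def pvSetAt (xs : List String) (i : Int) (v : String) : List String := xs.set i.toNat v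

-- the 'for idx, line in enumerate(lines)' scan: state (idx, codeblocks, languages)
def pvStepScanA (st : Int × List Int × PySem.Dict Int String) (line : String) :
    Int × List Int × PySem.Dict Int String :=
  if PySem.Str.startswith (PySem.Str.strip line) "```" then
    let cbs := st.2.1 ++ [st.1]
    let lang := PySem.Str.strip (PySem.Str.replace line "```" "")
    if PySem.Str.len lang > 0 then (st.1 + 1, cbs, st.2.2.insert st.1 lang)
    else (st.1 + 1, cbs, st.2.2)
  else (st.1 + 1, st.2.1, st.2.2)

-- one iteration of 'for i in range(0, len(codeblocks), 2)': state (lines, codeblocks)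
def pvStepLoopA (languages : PySem.Dict Int String) (st : List String × List Int) (i : Int) :
    List String × List Int :=
  match PySem.List.pyGet? st.2 i, PySem.List.pyGet? st.2 (i + 1) with
  | some start, some stop =>
      let btPrefix := pvGetBackticksPrefix ((PySem.List.pyGet? st.1 start).getD "")
      let lang := languages.getD start ""
      let lines1 :=
        if lang ≠ "" then
          pvSetAt st.1 start
            (btPrefix ++ "<pre class=\"highlight\"><code class=\"language-" ++ lang ++ "\">")
        else pvSetAt st.1 start (btPrefix ++ "<pre><code>")
      let lines2 := pvSetAt lines1 stop
        (PySem.Str.replace ((PySem.List.pyGet? lines1 stop).getD "") "```" "</code></pre>")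
      (lines2, (st.2.drop 1).drop 1)   -- codeblocks.pop(0); codeblocks.pop(0)
  | _, _ => st  -- Python raises IndexError here (outside Pre_)

def format_codeblock (text : String) : String :=
  let lines := (PySem.Str.split? text "\n").getD []   -- sep ≠ "", never none
  let scan := lines.foldl pvStepScanA (0, [], PySem.Dict.empty)
  let codeblocks := scan.2.1
  let languages := scan.2.2
  if codeblocks.length % 2 ≠ 0 then ""   -- Python raises ValueError here (outside Pre_)
  else
    let fin := (PySem.List.pyRange 0 (codeblocks.length : Int) 2).foldl
      (pvStepLoopA languages) (lines, codeblocks)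
    PySem.Str.join "\n" fin.1

-- ===== PORT B =====
-- one line of B's single pass: state (output lines, in_block flag)
def pvStepB (st : List String × Bool) (line : String) : List String × Bool :=
  if PySem.Str.startswith (PySem.Str.strip line) "```" then
    if st.2 = false then
      let prefx := PySem.Str.slice line none (some (PySem.Str.find line "```"))
      let lang := PySem.Str.strip (PySem.Str.replace line "```" "")
      if lang ≠ "" then
        (st.1 ++ [prefx ++ "<pre class=\"highlight\"><code class=\"language-" ++ lang ++ "\">"], true)
      else (st.1 ++ [prefx ++ "<pre><code>"], true)
    else (st.1 ++ [PySem.Str.replace line "```" "</code></pre>"], false)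
  else (st.1 ++ [line], st.2)

def format_codeblock_alt (text : String) : String :=
  let r := ((PySem.Str.split? text "\n").getD []).foldl pvStepB ([], false)
  -- if r.2 then Python B raises ValueError (outside Pre_)
  PySem.Str.join "\n" r.1

-- ===== PRECONDITION & SPEC =====
-- Pre_ admits exactly the inputs where A returns: A raises ValueError when the number of fence
-- lines is odd, and raises IndexError (stale range indices into a popped list) whenever it is an
-- even number ≥ 4; only counts 0 and 2 return.
def Pre_format_codeblock (text : String) : Prop :=
  let n := ((PySem.Str.split? text "\n").getD []).countP
    (fun l => PySem.Str.startswith (PySem.Str.strip l) "```")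
  n = 0 ∨ n = 2
instance (text : String) : Decidable (Pre_format_codeblock text) := by
  unfold Pre_format_codeblock; infer_instance

def pvWitness_format_codeblock : String := "x\n```py\na = 1\n```\nz"

-- On any text with an even number ≥ 4 of fence lines (two or more code blocks) A raises
-- IndexError, while B returns the text with every code block converted.
def Raises_format_codeblock (text : String) : Prop :=
  let n := ((PySem.Str.split? text "\n").getD []).countP
    (fun l => PySem.Str.startswith (PySem.Str.strip l) "```")
  n % 2 = 0 ∧ 4 ≤ n
instance (text : String) : Decidable (Raises_format_codeblock text) := by
  unfold Raises_format_codeblock; infer_instance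

def pvRaiseWitness_format_codeblock : String := "```\na\n```\n```py\nb\n```"
def pvRaiseWitnessOut_format_codeblock : String :=
  "<pre><code>\na\n</code></pre>\n<pre class=\"highlight\"><code class=\"language-py\">\nb\n</code></pre>"

def Spec_format_codeblock (text : String) (out : String) : Prop := out = format_codeblock_alt text
instance (text : String) (out : String) : Decidable (Spec_format_codeblock text out) := by
  unfold Spec_format_codeblock; infer_instance

-- ===== CLAIM (what is proved, stated in full; the proofs are below) =====
def Claim_equal_format_codeblock : Prop := ∀ (text : String), Dom_format_codeblock text →
  Pre_format_codeblock text → Spec_format_codeblock text (format_codeblock text)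

def Claim_raises_format_codeblock : Prop :=
  (∀ (text : String), Dom_format_codeblock text → Raises_format_codeblock text →
    ¬ Pre_format_codeblock text) ∧
  (Dom_format_codeblock (pvRaiseWitness_format_codeblock) ∧
    Raises_format_codeblock (pvRaiseWitness_format_codeblock) ∧
    format_codeblock_alt (pvRaiseWitness_format_codeblock) = pvRaiseWitnessOut_format_codeblock)


-- ===== LEMMAS AND PROOFS =====

-- the fence test, named for the proofs (the ports and Pre_ write it inline, as the Python does)
def pvF (l : String) : Bool := PySem.Str.startswith (PySem.Str.strip l) "```"

theorem pv_len_pos (s : String) : (PySem.Str.len s > 0) ↔ s ≠ "" := by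
  rw [PySem.Str.len_eq]
  constructor
  · intro h he; rw [he] at h; simp at h
  · intro h
    have : s.toList ≠ [] := fun hn => h (String.toList_eq_nil_iff.mp hn)
    have : 0 < s.toList.length := List.length_pos_iff.mpr this
    exact_mod_cast this

theorem pv_fence_find (a : String) (ha : pvF a = true) : PySem.Str.find a "```" ≠ -1 := by
  unfold pvF at ha
  rw [PySem.Str.startswith_eq, PySem.Str.toList_strip] at ha
  rw [PySem.Str.find_ne_neg_one_iff]
  have h1 : "```".toList <+: PySem.Chars.strip a.toList := (PySem.Chars.startswith_iff _ _).mp ha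
  have h2 : PySem.Chars.strip a.toList <:+: a.toList := by
    unfold PySem.Chars.strip PySem.Chars.rstrip PySem.Chars.lstrip
    have hpre : (List.dropWhile PySem.Chars.isspace
        (List.dropWhile PySem.Chars.isspace a.toList).reverse).reverse <+:
        List.dropWhile PySem.Chars.isspace a.toList := by
      have := List.reverse_prefix.mpr
        (List.dropWhile_suffix (l := (List.dropWhile PySem.Chars.isspace a.toList).reverse)
          PySem.Chars.isspace)
      simpa using this
    exact hpre.isInfix.trans (List.dropWhile_suffix _).isInfix
  exact h1.isInfix.trans h2

theorem pv_B_free (u : List String) (acc : List String) (fl : Bool)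
    (h : ∀ l ∈ u, pvF l = false) : u.foldl pvStepB (acc, fl) = (acc ++ u, fl) := by
  induction u generalizing acc with
  | nil => simp
  | cons x t ih =>
    have hx : pvF x = false := h x (by simp)
    have ht : ∀ l ∈ t, pvF l = false := fun l hl => h l (by simp [hl])
    unfold pvF at hx
    simp only [List.foldl_cons, pvStepB, hx, Bool.false_eq_true, if_false]
    rw [ih (acc ++ [x]) ht]
    simp

theorem pv_scan_free (u : List String) (k : Int) (cbs : List Int) (d : PySem.Dict Int String)
    (h : ∀ l ∈ u, pvF l = false) :
    u.foldl pvStepScanA (k, cbs, d) = (k + u.length, cbs, d) := by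
  induction u generalizing k with
  | nil => simp
  | cons x t ih =>
    have hx : pvF x = false := h x (by simp)
    unfold pvF at hx
    simp only [List.foldl_cons, pvStepScanA, hx, Bool.false_eq_true, if_false]
    rw [ih _ (fun l hl => h l (by simp [hl]))]
    simp; omega

theorem pv_decomp (L : List String) (n : Nat) (h : L.countP pvF = n + 1) :
    ∃ u a v, L = u ++ a :: v ∧ (∀ l ∈ u, pvF l = false) ∧ pvF a = true ∧ v.countP pvF = n := by
  induction L with
  | nil => simp at h
  | cons x t ih =>
    by_cases hx : pvF x = true
    · exact ⟨[], x, t, by simp, by simp, hx, by simp [hx] at h; omega⟩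
    · have hx' : pvF x = false := by simpa using hx
      have ht : t.countP pvF = n + 1 := by simp [hx'] at h; omega
      obtain ⟨u, a, v, hL, hu, ha, hv⟩ := ih ht
      refine ⟨x :: u, a, v, by simp [hL], ?_, ha, hv⟩
      intro l hl
      rcases List.mem_cons.mp hl with rfl | hl'
      · exact hx'
      · exact hu l hl'

theorem pv_case0 (L : List String) (h : ∀ l ∈ L, pvF l = false) :
    (if (L.foldl pvStepScanA (0, [], PySem.Dict.empty)).2.1.length % 2 ≠ 0 then ""
     else PySem.Str.join "\n" ((PySem.List.pyRange 0
        (((L.foldl pvStepScanA (0, [], PySem.Dict.empty)).2.1.length : Int)) 2).foldl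
        (pvStepLoopA (L.foldl pvStepScanA (0, [], PySem.Dict.empty)).2.2)
        (L, (L.foldl pvStepScanA (0, [], PySem.Dict.empty)).2.1)).1) =
    PySem.Str.join "\n" (L.foldl pvStepB ([], false)).1 := by
  rw [pv_scan_free L 0 [] PySem.Dict.empty h, pv_B_free L [] false h]
  norm_num
  rw [show PySem.List.pyRange 0 0 2 = [] from by decide, List.foldl_nil]

theorem pv_case2 (u v w : List String) (a b : String)
    (hu : ∀ l ∈ u, pvF l = false) (hv : ∀ l ∈ v, pvF l = false) (hw : ∀ l ∈ w, pvF l = false)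
    (ha : pvF a = true) (hb : pvF b = true) :
    (if ((u ++ a :: (v ++ b :: w)).foldl pvStepScanA (0, [], PySem.Dict.empty)).2.1.length % 2 ≠ 0 then ""
     else PySem.Str.join "\n" ((PySem.List.pyRange 0
        ((((u ++ a :: (v ++ b :: w)).foldl pvStepScanA (0, [], PySem.Dict.empty)).2.1.length : Int)) 2).foldl
        (pvStepLoopA ((u ++ a :: (v ++ b :: w)).foldl pvStepScanA (0, [], PySem.Dict.empty)).2.2)
        ((u ++ a :: (v ++ b :: w)), ((u ++ a :: (v ++ b :: w)).foldl pvStepScanA (0, [], PySem.Dict.empty)).2.1)).1) =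
    PySem.Str.join "\n" ((u ++ a :: (v ++ b :: w)).foldl pvStepB ([], false)).1 := by
  have ha' := ha; unfold pvF at ha'
  have hb' := hb; unfold pvF at hb'
  set la := PySem.Str.strip (PySem.Str.replace a "```" "") with hla_def
  set lb := PySem.Str.strip (PySem.Str.replace b "```" "") with hlb_def
  set i : Int := (u.length : Int) with hi_def
  set j : Int := (u.length : Int) + 1 + (v.length : Int) with hj_def
  -- evaluate one scan step on a fence line
  have hstep : ∀ (line : String) (lg : String), lg = PySem.Str.strip (PySem.Str.replace line "```" "") →
      PySem.Str.startswith (PySem.Str.strip line) "```" = true →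
      ∀ (k : Int) (cbs : List Int) (d : PySem.Dict Int String), pvStepScanA (k, cbs, d) line =
      (k + 1, cbs ++ [k], if lg = "" then d else d.insert k lg) := by
    intro line lg hlg hline k cbs d
    unfold pvStepScanA
    rw [if_pos hline]
    dsimp only
    by_cases h : lg = ""
    · rw [if_neg (by rw [pv_len_pos, ← hlg]; simpa using h)]
      simp [h]
    · rw [if_pos (by rw [pv_len_pos, ← hlg]; exact h)]
      simp [← hlg, h]
  have hij : i ≠ j := by omega
  -- the scan
  have hscan : (u ++ a :: (v ++ b :: w)).foldl pvStepScanA (0, [], PySem.Dict.empty)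
      = (j + 1 + (w.length : Int), [i, j],
         if lb = "" then (if la = "" then PySem.Dict.empty else PySem.Dict.empty.insert i la)
         else (if la = "" then PySem.Dict.empty else PySem.Dict.empty.insert i la).insert j lb) := by
    rw [List.foldl_append, pv_scan_free u _ _ _ hu, List.foldl_cons,
        hstep a la hla_def ha' _ _ _, List.foldl_append, pv_scan_free v _ _ _ hv, List.foldl_cons,
        hstep b lb hlb_def hb' _ _ _, pv_scan_free w _ _ _ hw]
    rw [zero_add ((u.length : Int))]
    simp only [List.nil_append, Prod.mk.injEq]
    refine ⟨by ring, rfl, rfl⟩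
  rw [hscan]
  set dB := (if lb = "" then (if la = "" then PySem.Dict.empty else PySem.Dict.empty.insert i la)
      else (if la = "" then (PySem.Dict.empty : PySem.Dict Int String)
        else PySem.Dict.empty.insert i la).insert j lb) with hdB_def
  have hgetD : dB.getD i "" = la := by
    have hempty : (PySem.Dict.empty : PySem.Dict Int String).getD i "" = "" := rfl
    rw [hdB_def]
    by_cases hB : lb = ""
    · rw [if_pos hB]
      by_cases hA : la = ""
      · rw [if_pos hA, hempty, hA]
      · rw [if_neg hA, PySem.Dict.getD_insert, if_pos rfl]
    · rw [if_neg hB, PySem.Dict.getD_insert, if_neg hij]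
      by_cases hA : la = ""
      · rw [if_pos hA, hempty, hA]
      · rw [if_neg hA, PySem.Dict.getD_insert, if_pos rfl]
  -- assembling A's two in-place updates, for any opening line X
  have hassemble : ∀ X : String,
      pvSetAt (pvSetAt (u ++ a :: (v ++ b :: w)) i X) j
        (PySem.Str.replace ((PySem.List.pyGet? (pvSetAt (u ++ a :: (v ++ b :: w)) i X) j).getD "")
          "```" "</code></pre>")
      = u ++ X :: (v ++ (PySem.Str.replace b "```" "</code></pre>") :: w) := by
    intro X
    have hset1 : pvSetAt (u ++ a :: (v ++ b :: w)) i X = u ++ X :: (v ++ b :: w) := by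
      unfold pvSetAt; rw [hi_def, Int.toNat_natCast]; simp
    rw [hset1]
    have hre : u ++ X :: (v ++ b :: w) = (u ++ X :: v) ++ b :: w := by simp
    have hjn : j = (((u ++ X :: v).length : Nat) : Int) := by
      rw [hj_def]; simp; ring
    have hgetB : PySem.List.pyGet? (u ++ X :: (v ++ b :: w)) j = some b := by
      rw [hre, hjn, PySem.List.pyGet?_natCast]; simp
    rw [hgetB]
    unfold pvSetAt
    rw [hjn, Int.toNat_natCast, hre]
    simp
  -- the A side
  have h0 : PySem.List.pyGet? [i, j] (0 : Int) = some i := by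
    simp [PySem.List.pyGet?, PySem.List.pyIdx?]
  have h1 : PySem.List.pyGet? [i, j] ((0 : Int) + 1) = some j := by
    norm_num [PySem.List.pyGet?, PySem.List.pyIdx?]
  have hgetA : PySem.List.pyGet? (u ++ a :: (v ++ b :: w)) i = some a := by
    rw [hi_def, PySem.List.pyGet?_natCast]; simp
  have hpfx : pvGetBackticksPrefix a
      = PySem.Str.slice a none (some (PySem.Str.find a "```")) := by
    unfold pvGetBackticksPrefix
    rw [if_neg (pv_fence_find a ha)]
  -- the B side
  have hBstepa : pvStepB (u, false) a
      = (u ++ [if la ≠ "" then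
          PySem.Str.slice a none (some (PySem.Str.find a "```")) ++
            "<pre class=\"highlight\"><code class=\"language-" ++ la ++ "\">"
        else PySem.Str.slice a none (some (PySem.Str.find a "```")) ++ "<pre><code>"], true) := by
    unfold pvStepB
    rw [if_pos ha']
    dsimp only
    rw [if_pos rfl]
    split_ifs <;> rfl
  have hBside : (u ++ a :: (v ++ b :: w)).foldl pvStepB ([], false)
      = ((u ++ [if la ≠ "" then
          PySem.Str.slice a none (some (PySem.Str.find a "```")) ++
            "<pre class=\"highlight\"><code class=\"language-" ++ la ++ "\">"
        else PySem.Str.slice a none (some (PySem.Str.find a "```")) ++ "<pre><code>"])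
          ++ v ++ [PySem.Str.replace b "```" "</code></pre>"] ++ w, false) := by
    rw [List.foldl_append, pv_B_free u [] false hu, List.nil_append, List.foldl_cons, hBstepa,
        List.foldl_append, pv_B_free v _ true hv, List.foldl_cons]
    have hBstepb : pvStepB ((u ++ [if la ≠ "" then
          PySem.Str.slice a none (some (PySem.Str.find a "```")) ++
            "<pre class=\"highlight\"><code class=\"language-" ++ la ++ "\">"
        else PySem.Str.slice a none (some (PySem.Str.find a "```")) ++ "<pre><code>"]) ++ v, true) b
        = (((u ++ [if la ≠ "" then
          PySem.Str.slice a none (some (PySem.Str.find a "```")) ++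
            "<pre class=\"highlight\"><code class=\"language-" ++ la ++ "\">"
        else PySem.Str.slice a none (some (PySem.Str.find a "```")) ++ "<pre><code>"]) ++ v)
            ++ [PySem.Str.replace b "```" "</code></pre>"], false) := by
      unfold pvStepB
      rw [if_pos hb']
      dsimp only
      rw [if_neg (by simp)]
    rw [hBstepb, pv_B_free w _ false hw]
  rw [hBside]
  -- finish: reduce the A side expression
  have hlen2 : ([i, j] : List Int).length = 2 := rfl
  rw [hlen2]
  rw [if_neg (by norm_num)]
  norm_num
  have hrange : PySem.List.pyRange 0 (2 : Int) 2 = [0] := by decide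
  rw [hrange, List.foldl_cons, List.foldl_nil]
  unfold pvStepLoopA
  rw [h0, h1]
  dsimp only
  rw [hgetA, hgetD]
  dsimp only [Option.getD_some]
  rw [hpfx]
  rw [← apply_ite (pvSetAt (u ++ a :: (v ++ b :: w)) i), hassemble]
  simp

theorem pv_main (L : List String)
    (h : L.countP (fun l => PySem.Str.startswith (PySem.Str.strip l) "```") = 0 ∨
         L.countP (fun l => PySem.Str.startswith (PySem.Str.strip l) "```") = 2) :
    (if (L.foldl pvStepScanA (0, [], PySem.Dict.empty)).2.1.length % 2 ≠ 0 then ""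
     else PySem.Str.join "\n" ((PySem.List.pyRange 0
        ((L.foldl pvStepScanA (0, [], PySem.Dict.empty)).2.1.length : Int) 2).foldl
        (pvStepLoopA (L.foldl pvStepScanA (0, [], PySem.Dict.empty)).2.2)
        (L, (L.foldl pvStepScanA (0, [], PySem.Dict.empty)).2.1)).1) =
    PySem.Str.join "\n" (L.foldl pvStepB ([], false)).1 := by
  have h' : L.countP pvF = 0 ∨ L.countP pvF = 2 := h
  rcases h' with h' | h'
  · exact pv_case0 L (fun l hl => by
      have := (List.countP_eq_zero.mp h') l hl
      simpa using this)
  · obtain ⟨u, a, v', hL, hu, ha, hv'⟩ := pv_decomp L 1 h'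
    obtain ⟨v, b, w, hV, hv, hb, hw⟩ := pv_decomp v' 0 hv'
    have hw' : ∀ l ∈ w, pvF l = false := fun l hl => by
      have := (List.countP_eq_zero.mp hw) l hl
      simpa using this
    rw [hL, hV]
    exact pv_case2 u v w a b hu hv hw' ha hb

-- ===== VERDICT (by name: the statement is the Claim_ definition above) =====
theorem format_codeblock_spec : Claim_equal_format_codeblock := by
  intro text _ hpre
  unfold Spec_format_codeblock format_codeblock format_codeblock_alt
  exact pv_main _ hpre

@[simp] theorem format_codeblock_raises : Claim_raises_format_codeblock := by
  unfold Claim_raises_format_codeblock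
  constructor
  · intro text _ hr hp
    unfold Raises_format_codeblock at hr
    unfold Pre_format_codeblock at hp
    omega
  · refine ⟨by decide, by decide, by decide⟩
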